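-- pv_equiv track=rewrite | github.com/luis314159/quote_system | tests/travel2.py | generate_frame
-- ===== SOURCE A (Python) =====
-- def generate_frame(width, height, plane, plane_x, plane_y, clouds):
--     """
--     Genera un frame de la animación.
--
--     Parámetros:
--       - width, height: dimensiones del "canvas".
--       - plane: lista de strings con el dibujo ASCII del avión.
--       - plane_x, plane_y: posición superior izquierda donde dibujar el avión.
--       - clouds: lista de tuplas (x, y, texto) con nubes.
--     """
--     # Crear una "pantalla" en blanco
--     grid = [[" " for _ in range(width)] for _ in range(height)]
--
--     # Dibujar la pista (runway) en la última línea
--     runway_row = height - 1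
--     for x in range(width):
--         grid[runway_row][x] = "="  # Pista representada con "="
--
--     # Dibujar las nubes en posiciones fijas
--     for cx, cy, cloud_text in clouds:
--         if 0 <= cy < height:
--             for i, char in enumerate(cloud_text):
--                 if 0 <= cx + i < width:
--                     grid[cy][cx + i] = char
--
--     # Dibujar el avión (considerando que puede tener varias líneas)
--     for i, line in enumerate(plane):
--         row = plane_y + i
--         if 0 <= row < height:
--             for j, char in enumerate(line):
--                 col = plane_x + j
--                 if 0 <= col < width:
--                     grid[row][col] = char
--
--     # Convertir la "pantalla" en una cadena
--     frame_lines = ["".join(row) for row in grid]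
--     return "\n".join(frame_lines)
-- ===== SOURCE B (Python) =====
-- def generate_frame(width, height, plane, plane_x, plane_y, clouds):
--     """Per-cell renderer: instead of painting a blank grid layer by layer,
--     decide each character by a priority query (plane > last covering cloud
--     > runway > blank)."""
--     def cell(row, col):
--         i = row - plane_y
--         if 0 <= i < len(plane):
--             j = col - plane_x
--             if 0 <= j < len(plane[i]):
--                 return plane[i][j]
--         for cx, cy, text in reversed(clouds):
--             if cy == row and cx <= col < cx + len(text):
--                 return text[col - cx]
--         if row == height - 1:
--             return "="
--         return " "
--     return "\n".join("".join(cell(r, c) for c in range(width)) for r in range(height))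
-- ===== Notes on version B (the rewrite author's own statement) =====
-- stated objective: alternative
-- what changed: Replaces A's painter's algorithm (allocate a blank grid, then destructively overlay runway, clouds and plane in order) with a grid-free per-cell priority query that decides each character by checking the plane, then the clouds in reverse order, then the runway, then blank.
import Mathlib
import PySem

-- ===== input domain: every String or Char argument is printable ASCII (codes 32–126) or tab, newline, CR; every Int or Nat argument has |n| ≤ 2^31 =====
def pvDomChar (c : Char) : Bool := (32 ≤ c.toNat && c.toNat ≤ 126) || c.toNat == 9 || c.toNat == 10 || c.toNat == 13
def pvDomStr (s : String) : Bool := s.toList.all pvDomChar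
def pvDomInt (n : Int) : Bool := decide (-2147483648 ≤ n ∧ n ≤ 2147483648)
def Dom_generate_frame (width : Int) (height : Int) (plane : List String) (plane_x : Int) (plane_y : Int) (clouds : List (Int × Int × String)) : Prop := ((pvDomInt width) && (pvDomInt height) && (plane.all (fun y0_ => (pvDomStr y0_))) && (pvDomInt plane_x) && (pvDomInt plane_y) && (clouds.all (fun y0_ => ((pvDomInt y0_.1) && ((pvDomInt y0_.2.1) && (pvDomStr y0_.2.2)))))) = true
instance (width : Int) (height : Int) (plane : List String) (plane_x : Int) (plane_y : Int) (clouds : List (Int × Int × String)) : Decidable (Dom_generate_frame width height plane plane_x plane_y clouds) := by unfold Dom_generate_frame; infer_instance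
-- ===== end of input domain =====

-- B replaces A's painter's algorithm (blank grid overwritten layer by layer) by a per-cell
-- priority query (plane, then last covering cloud, then runway, then blank); not faster, an
-- alternative decomposition proved to render the identical frame.

-- ===== PORT A =====
-- grid[r][c] = ch (guards in A ensure the indices are in range wherever this runs inside Pre_)
def setCell (g : List (List Char)) (r c : Int) (ch : Char) : List (List Char) :=
  g.modify r.toNat (fun row => row.set c.toNat ch)

def generate_frame (width : Int) (height : Int) (plane : List String) (plane_x : Int) (plane_y : Int) (clouds : List (Int × Int × String)) : String :=
  -- grid = [[" " for _ in range(width)] for _ in range(height)]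
  let grid : List (List Char) :=
    (PySem.List.pyRange 0 height 1).map (fun _ => (PySem.List.pyRange 0 width 1).map (fun _ => ' '))
  -- runway
  let runway_row := height - 1
  let grid := (PySem.List.pyRange 0 width 1).foldl (fun g x => setCell g runway_row x '=') grid
  -- clouds
  let grid := clouds.foldl (fun g cl =>
    if 0 ≤ cl.2.1 ∧ cl.2.1 < height then
      (PySem.List.enumerate cl.2.2.toList 0).foldl (fun g ic =>
        if 0 ≤ cl.1 + ic.1 ∧ cl.1 + ic.1 < width then setCell g cl.2.1 (cl.1 + ic.1) ic.2 else g) g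
    else g) grid
  -- plane
  let grid := (PySem.List.enumerate plane 0).foldl (fun g il =>
    let row := plane_y + il.1
    if 0 ≤ row ∧ row < height then
      (PySem.List.enumerate il.2.toList 0).foldl (fun g jc =>
        let col := plane_x + jc.1
        if 0 ≤ col ∧ col < width then setCell g row col jc.2 else g) g
    else g) grid
  PySem.Str.join "\n" (grid.map String.ofList)

-- ===== PORT B =====
-- one cell of the frame, decided by priority: plane, else last covering cloud, else runway, else blank
def cellB (height : Int) (plane : List String) (plane_x : Int) (plane_y : Int) (clouds : List (Int × Int × String)) (row col : Int) : Char :=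
  let i := row - plane_y
  let planeHit : Option Char :=
    if 0 ≤ i ∧ i < (plane.length : Int) then
      let line := (plane.getD i.toNat "").toList
      let j := col - plane_x
      if 0 ≤ j ∧ j < (line.length : Int) then some (line.getD j.toNat ' ') else none
    else none
  match planeHit with
  | some ch => ch
  | none =>
    match clouds.reverse.findSome? (fun cl =>
        if cl.2.1 = row ∧ cl.1 ≤ col ∧ col < cl.1 + (cl.2.2.toList.length : Int) then
          some (cl.2.2.toList.getD (col - cl.1).toNat ' ')
        else none) with
    | some ch => ch
    | none => if row = height - 1 then '=' else ' '

def generate_frame_alt (width : Int) (height : Int) (plane : List String) (plane_x : Int) (plane_y : Int) (clouds : List (Int × Int × String)) : String :=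
  PySem.Str.join "\n"
    ((PySem.List.pyRange 0 height 1).map (fun r =>
      String.ofList ((PySem.List.pyRange 0 width 1).map (fun c =>
        cellB height plane plane_x plane_y clouds r c))))

-- ===== PRECONDITION & SPEC =====
-- A raises IndexError (grid[-1] on the empty grid) exactly when width > 0 and height ≤ 0;
-- Pre_ excludes only those inputs, on every other input A returns normally.
def Pre_generate_frame (width : Int) (height : Int) (plane : List String) (plane_x : Int) (plane_y : Int) (clouds : List (Int × Int × String)) : Prop := 0 < width → 0 < height
instance (width : Int) (height : Int) (plane : List String) (plane_x : Int) (plane_y : Int) (clouds : List (Int × Int × String)) : Decidable (Pre_generate_frame width height plane plane_x plane_y clouds) := by unfold Pre_generate_frame; infer_instance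

def pvWitness_generate_frame : Int × Int × List String × Int × Int × (List (Int × Int × String)) :=
  (6, 3, ["<->"], 1, 0, [(2, 1, "o o")])

def Spec_generate_frame (width : Int) (height : Int) (plane : List String) (plane_x : Int) (plane_y : Int) (clouds : List (Int × Int × String)) (out : String) : Prop := out = generate_frame_alt width height plane plane_x plane_y clouds
instance (width : Int) (height : Int) (plane : List String) (plane_x : Int) (plane_y : Int) (clouds : List (Int × Int × String)) (out : String) : Decidable (Spec_generate_frame width height plane plane_x plane_y clouds out) := by unfold Spec_generate_frame; infer_instance

-- ===== CLAIM (what is proved, stated in full; the proofs are below) =====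
def Claim_equal_generate_frame : Prop := ∀ (width : Int) (height : Int) (plane : List String) (plane_x : Int) (plane_y : Int) (clouds : List (Int × Int × String)), Dom_generate_frame width height plane plane_x plane_y clouds → Pre_generate_frame width height plane plane_x plane_y clouds → Spec_generate_frame width height plane plane_x plane_y clouds (generate_frame width height plane plane_x plane_y clouds)


-- ===== LEMMAS AND PROOFS =====

-- reading a cell (Nat indices, default ' ')
def getCell (g : List (List Char)) (r c : Nat) : Char := (g.getD r []).getD c ' '

-- selector: the paint op at Int coordinates hitting cell (r, c)
def selC (r c : Nat) (op : Int × Int × Char) : Option Char :=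
  if op.1 = (r : Int) ∧ op.2.1 = (c : Int) then some op.2.2 else none

def paintOps (g : List (List Char)) (ops : List (Int × Int × Char)) : List (List Char) :=
  ops.foldl (fun g op => setCell g op.1 op.2.1 op.2.2) g

def Shape (g : List (List Char)) (h w : Nat) : Prop :=
  g.length = h ∧ ∀ (k : Nat) (hk : k < g.length), g[k].length = w

def InRangeOp (width height : Int) (op : Int × Int × Char) : Prop :=
  0 ≤ op.1 ∧ op.1 < height ∧ 0 ≤ op.2.1 ∧ op.2.1 < width

-- the three layers of paint operations, in A's order
def opsRunway (width height : Int) : List (Int × Int × Char) :=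
  (PySem.List.pyRange 0 width 1).map (fun x => (height - 1, x, '='))

def opsClouds (width height : Int) (clouds : List (Int × Int × String)) : List (Int × Int × Char) :=
  clouds.flatMap (fun cl =>
    if 0 ≤ cl.2.1 ∧ cl.2.1 < height then
      (PySem.List.enumerate cl.2.2.toList 0).filterMap (fun ic =>
        if 0 ≤ cl.1 + ic.1 ∧ cl.1 + ic.1 < width then some (cl.2.1, cl.1 + ic.1, ic.2) else none)
    else [])

def opsPlane (width height : Int) (plane : List String) (plane_x plane_y : Int) : List (Int × Int × Char) :=
  (PySem.List.enumerate plane 0).flatMap (fun il =>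
    if 0 ≤ plane_y + il.1 ∧ plane_y + il.1 < height then
      (PySem.List.enumerate il.2.toList 0).filterMap (fun jc =>
        if 0 ≤ plane_x + jc.1 ∧ plane_x + jc.1 < width then some (plane_y + il.1, plane_x + jc.1, jc.2) else none)
    else [])

theorem shape_setCell {g : List (List Char)} {h w : Nat} (hs : Shape g h w) (r c : Int) (ch : Char) :
    Shape (setCell g r c ch) h w := by
  obtain ⟨h1, h2⟩ := hs
  refine ⟨by simpa [setCell] using h1, ?_⟩
  intro k hk
  simp only [setCell, List.length_modify] at hk ⊢
  rw [List.getElem_modify]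
  split <;> simp [List.length_set, h2 k hk]


theorem shape_paintOps {h w : Nat} (ops : List (Int × Int × Char)) {g : List (List Char)} (hs : Shape g h w) :
    Shape (paintOps g ops) h w := by
  induction ops generalizing g with
  | nil => simpa [paintOps] using hs
  | cons op rest ih => simpa [paintOps] using ih (shape_setCell hs op.1 op.2.1 op.2.2)


theorem getCell_setCell {g : List (List Char)} {h w : Nat} (hs : Shape g h w) {a b : Int}
    (ha : 0 ≤ a ∧ a < (h : Int)) (hb : 0 ≤ b ∧ b < (w : Int)) (ch : Char) {r c : Nat}
    (hr : r < h) (hc : c < w) :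
    getCell (setCell g a b ch) r c = if a = (r : Int) ∧ b = (c : Int) then ch else getCell g r c := by
  obtain ⟨h1, h2⟩ := hs
  have hrg : r < g.length := by omega
  have hcg : c < g[r].length := by rw [h2 r hrg]; omega
  have hml : r < (g.modify a.toNat (fun row => row.set b.toNat ch)).length := by
    simpa [List.length_modify] using hrg
  have hset : c < (g[r].set b.toNat ch).length := by simpa [List.length_set] using hcg
  unfold getCell setCell
  rw [List.getD_eq_getElem?_getD (l := g.modify a.toNat (fun row => row.set b.toNat ch)),
      List.getElem?_eq_getElem hml, Option.getD_some,
      List.getD_eq_getElem?_getD (l := g) (i := r),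
      List.getElem?_eq_getElem hrg, Option.getD_some,
      List.getElem_modify]
  by_cases hA : a = (r : Int)
  · have hA' : a.toNat = r := by omega
    rw [if_pos hA']
    rw [List.getD_eq_getElem?_getD, List.getElem?_eq_getElem hset,
        Option.getD_some, List.getElem_set,
        List.getD_eq_getElem?_getD, List.getElem?_eq_getElem hcg, Option.getD_some]
    by_cases hB : b = (c : Int)
    · have : b.toNat = c := by omega
      simp [this, hA, hB]
    · have : b.toNat ≠ c := by omega
      simp [this, hA, hB]
  · have hA' : a.toNat ≠ r := by omega
    rw [if_neg hA']
    simp [hA]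

theorem getCell_paintOps {h w : Nat} {ops : List (Int × Int × Char)}
    (hops : ∀ op ∈ ops, InRangeOp (w : Int) (h : Int) op)
    {g : List (List Char)} (hs : Shape g h w) {r c : Nat} (hr : r < h) (hc : c < w) :
    getCell (paintOps g ops) r c = (ops.reverse.findSome? (selC r c)).getD (getCell g r c) := by
  induction ops generalizing g with
  | nil => simp [paintOps]
  | cons op rest ih =>
    have hop := hops op (List.mem_cons_self)
    have hrest : ∀ o ∈ rest, InRangeOp (w : Int) (h : Int) o :=
      fun o ho => hops o (List.mem_cons_of_mem _ ho)
    have hs' := shape_setCell hs op.1 op.2.1 op.2.2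
    obtain ⟨ha0, ha1, hb0, hb1⟩ := hop
    calc getCell (paintOps g (op :: rest)) r c
        = (rest.reverse.findSome? (selC r c)).getD (getCell (setCell g op.1 op.2.1 op.2.2) r c) := by
          simpa [paintOps] using ih hrest hs'
      _ = ((op :: rest).reverse.findSome? (selC r c)).getD (getCell g r c) := by
          rw [getCell_setCell hs ⟨ha0, ha1⟩ ⟨hb0, hb1⟩ op.2.2 hr hc]
          simp only [List.reverse_cons, List.findSome?_append]
          rcases hfs : rest.reverse.findSome? (selC r c) with _ | v
          · rcases hsel : selC r c op with _ | v2
            · have : ¬ (op.1 = (r:Int) ∧ op.2.1 = (c:Int)) := by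
                intro hcond; simp [selC, hcond] at hsel
              simp [hfs, hsel, this]
            · have : (op.1 = (r:Int) ∧ op.2.1 = (c:Int)) ∧ v2 = op.2.2 := by
                by_cases hcond : op.1 = (r:Int) ∧ op.2.1 = (c:Int) <;>
                  simp [selC, hcond] at hsel <;> simp [hcond, hsel]
              simp [hfs, hsel, this.1, this.2]
          · simp [hfs]


theorem findSome?_flatMap' {α β γ : Type} (l : List α) (F : α → List β) (sel : β → Option γ) :
    (l.flatMap F).findSome? sel = l.findSome? (fun a => (F a).findSome? sel) := by
  induction l with
  | nil => simp
  | cons a rest ih =>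
    simp only [List.flatMap_cons, List.findSome?_append, List.findSome?_cons]
    rcases h : (F a).findSome? sel with _ | v <;> simp [h, ih]


theorem findSome?_if_const {α β : Type} (l : List α) (p : α → Prop) [DecidablePred p] (v : β) :
    (l.findSome? (fun x => if p x then some v else none)) = if ∃ x ∈ l, p x then some v else none := by
  induction l with
  | nil => simp
  | cons a rest ih =>
    simp only [List.findSome?_cons]
    by_cases h : p a
    · simp [h]
    · simp [h, ih]


-- converting A's folds into paintOps over the ops lists
theorem runway_fold_eq (width height : Int) (g : List (List Char)) :
    (PySem.List.pyRange 0 width 1).foldl (fun g x => setCell g (height - 1) x '=') g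
      = paintOps g (opsRunway width height) := by
  simp [paintOps, opsRunway, List.foldl_map]


theorem cloud_fold_eq (width height : Int) (clouds : List (Int × Int × String)) (g : List (List Char)) :
    clouds.foldl (fun g cl =>
      if 0 ≤ cl.2.1 ∧ cl.2.1 < height then
        (PySem.List.enumerate cl.2.2.toList 0).foldl (fun g ic =>
          if 0 ≤ cl.1 + ic.1 ∧ cl.1 + ic.1 < width then setCell g cl.2.1 (cl.1 + ic.1) ic.2 else g) g
      else g) g
      = paintOps g (opsClouds width height clouds) := by
  induction clouds generalizing g with
  | nil => simp [paintOps, opsClouds]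
  | cons cl rest ih =>
    simp only [List.foldl_cons, opsClouds, List.flatMap_cons] at *
    rw [ih]
    have hblock : ∀ (g : List (List Char)),
        (PySem.List.enumerate cl.2.2.toList 0).foldl (fun g ic =>
          if 0 ≤ cl.1 + ic.1 ∧ cl.1 + ic.1 < width then setCell g cl.2.1 (cl.1 + ic.1) ic.2 else g) g
        = paintOps g ((PySem.List.enumerate cl.2.2.toList 0).filterMap (fun ic =>
            if 0 ≤ cl.1 + ic.1 ∧ cl.1 + ic.1 < width then some (cl.2.1, cl.1 + ic.1, ic.2) else none)) := by
      generalize PySem.List.enumerate cl.2.2.toList 0 = l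
      induction l with
      | nil => simp [paintOps]
      | cons ic lrest ihl =>
        intro g
        by_cases hcond : 0 ≤ cl.1 + ic.1 ∧ cl.1 + ic.1 < width <;>
          simp [hcond, ihl, paintOps]
    by_cases hg : 0 ≤ cl.2.1 ∧ cl.2.1 < height
    · simp only [if_pos hg, hblock, paintOps, List.foldl_append]
    · simp [hg, paintOps]


theorem plane_fold_eq (width height : Int) (plane : List String) (plane_x plane_y : Int) (g : List (List Char)) :
    (PySem.List.enumerate plane 0).foldl (fun g il =>
      let row := plane_y + il.1
      if 0 ≤ row ∧ row < height then
        (PySem.List.enumerate il.2.toList 0).foldl (fun g jc =>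
          let col := plane_x + jc.1
          if 0 ≤ col ∧ col < width then setCell g row col jc.2 else g) g
      else g) g
      = paintOps g (opsPlane width height plane plane_x plane_y) := by
  unfold opsPlane
  generalize PySem.List.enumerate plane 0 = L
  induction L generalizing g with
  | nil => simp [paintOps]
  | cons il rest ih =>
    simp only [List.foldl_cons, List.flatMap_cons] at *
    rw [ih]
    have hblock : ∀ (g : List (List Char)),
        (PySem.List.enumerate il.2.toList 0).foldl (fun g jc =>
          if 0 ≤ plane_x + jc.1 ∧ plane_x + jc.1 < width then setCell g (plane_y + il.1) (plane_x + jc.1) jc.2 else g) g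
        = paintOps g ((PySem.List.enumerate il.2.toList 0).filterMap (fun jc =>
            if 0 ≤ plane_x + jc.1 ∧ plane_x + jc.1 < width then some (plane_y + il.1, plane_x + jc.1, jc.2) else none)) := by
      generalize PySem.List.enumerate il.2.toList 0 = l2
      induction l2 with
      | nil => simp [paintOps]
      | cons jc lrest ihl =>
        intro g
        by_cases hcond : 0 ≤ plane_x + jc.1 ∧ plane_x + jc.1 < width <;>
          simp [hcond, ihl, paintOps]
    by_cases hg : 0 ≤ plane_y + il.1 ∧ plane_y + il.1 < height
    · simp only [if_pos hg, hblock, paintOps, List.foldl_append]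
    · simp [hg, paintOps]

-- lookups
theorem runway_lookup (width height : Int) {r c : Nat}
    (hr : (r : Int) < height) (hc : (c : Int) < width) :
    (opsRunway width height).reverse.findSome? (selC r c)
      = if (r : Int) = height - 1 then some '=' else none := by
  unfold opsRunway
  rw [← List.map_reverse, List.findSome?_map]
  have hsel : (selC r c ∘ fun x => ((height - 1 : Int), x, '=')) =
      (fun x => if height - 1 = (r : Int) ∧ x = (c : Int) then some '=' else none) := by
    funext x; simp [selC, Function.comp]
  rw [hsel, findSome?_if_const]
  by_cases hR : (r : Int) = height - 1
  · rw [if_pos (by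
      exact ⟨(c : Int), by rw [List.mem_reverse, PySem.List.mem_pyRange_one]; omega, by omega, rfl⟩),
      if_pos hR]
  · rw [if_neg (by rintro ⟨x, hx, h1, h2⟩; omega), if_neg hR]


theorem block_lookup (width : Int) (t : List Char) (s x y : Int) {c : Nat} (hc : (c : Int) < width) (r : Nat) :
    (((PySem.List.enumerate t s).filterMap (fun ic =>
        if 0 ≤ x + ic.1 ∧ x + ic.1 < width then some (y, x + ic.1, ic.2) else none)).reverse).findSome? (selC r c)
      = if y = (r : Int) ∧ x + s ≤ (c : Int) ∧ (c : Int) < x + s + t.length then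
          some (t.getD ((c : Int) - (x + s)).toNat ' ') else none := by
  induction t generalizing s with
  | nil => simp [PySem.List.enumerate_nil]
  | cons ch t ih =>
    rw [PySem.List.enumerate_cons, List.filterMap_cons]
    have hlen : (((ch :: t).length : Int)) = (t.length : Int) + 1 := by
      simp only [List.length_cons]; push_cast; ring
    by_cases hg : 0 ≤ x + s ∧ x + s < width
    · rw [if_pos hg]
      simp only [List.reverse_cons, List.findSome?_append, ih (s + 1)]
      by_cases hy : y = (r : Int)
      · by_cases h1 : x + (s + 1) ≤ (c : Int) ∧ (c : Int) < x + (s + 1) + t.length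
        · have hk : ((c : Int) - (x + s)).toNat = ((c : Int) - (x + (s + 1))).toNat + 1 := by omega
          rw [if_pos ⟨hy, h1⟩, if_pos ⟨hy, by rw [hlen]; omega⟩]
          simp [hk, List.getD_cons_succ]
        · by_cases h2 : x + s = (c : Int)
          · have hk : ((c : Int) - (x + s)).toNat = 0 := by omega
            rw [if_neg (by tauto), if_pos ⟨hy, by rw [hlen]; omega⟩]
            simp [selC, hy, h2, hk]
          · rw [if_neg (by tauto), if_neg (by rw [hlen]; intro hcon; omega)]
            simp [selC, hy, h2]
      · rw [if_neg (by tauto), if_neg (by tauto)]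
        simp [selC, hy]
    · rw [if_neg hg]
      rw [ih (s + 1)]
      have hiff : (y = (r : Int) ∧ x + (s + 1) ≤ (c : Int) ∧ (c : Int) < x + (s + 1) + t.length)
          ↔ (y = (r : Int) ∧ x + s ≤ (c : Int) ∧ (c : Int) < x + s + ((ch :: t).length : Int)) := by
        rw [hlen]
        constructor <;> rintro ⟨hy, h1, h2⟩ <;> exact ⟨hy, by omega, by omega⟩
      by_cases hcond : y = (r : Int) ∧ x + (s + 1) ≤ (c : Int) ∧ (c : Int) < x + (s + 1) + t.length
      · have hk : ((c : Int) - (x + s)).toNat = ((c : Int) - (x + (s + 1))).toNat + 1 := by omega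
        rw [if_pos hcond, if_pos (hiff.mp hcond)]
        simp [hk, List.getD_cons_succ]
      · rw [if_neg hcond, if_neg (fun hc2 => hcond (hiff.mpr hc2))]
theorem cloud_lookup (width height : Int) (clouds : List (Int × Int × String)) {r c : Nat}
    (hr : (r : Int) < height) (hc : (c : Int) < width) :
    (opsClouds width height clouds).reverse.findSome? (selC r c)
      = clouds.reverse.findSome? (fun cl =>
          if cl.2.1 = (r : Int) ∧ cl.1 ≤ (c : Int) ∧ (c : Int) < cl.1 + (cl.2.2.toList.length : Int) then
            some (cl.2.2.toList.getD ((c : Int) - cl.1).toNat ' ')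
          else none) := by
  unfold opsClouds
  rw [List.reverse_flatMap, findSome?_flatMap']
  congr 1
  funext cl
  by_cases hg : 0 ≤ cl.2.1 ∧ cl.2.1 < height
  · simp only [Function.comp, if_pos hg]
    rw [block_lookup width cl.2.2.toList 0 cl.1 cl.2.1 hc r]
    simp only [add_zero]
  · simp only [Function.comp, if_neg hg]
    rw [if_neg (by rintro ⟨h1, _⟩; omega)]
    simp

theorem enum_rows_lookup (plane : List String) (plane_y : Int) (r : Nat) (F : String → Option Char) :
    ∀ (s : Int),
    ((PySem.List.enumerate plane s).reverse).findSome? (fun il =>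
        if plane_y + il.1 = (r : Int) then F il.2 else none)
      = if 0 ≤ (r : Int) - plane_y - s ∧ (r : Int) - plane_y - s < plane.length then
          F (plane.getD ((r : Int) - plane_y - s).toNat "") else none := by
  induction plane with
  | nil => intro s; simp [PySem.List.enumerate_nil]
  | cons p rest ih =>
    intro s
    rw [PySem.List.enumerate_cons]
    simp only [List.reverse_cons, List.findSome?_append, ih (s + 1)]
    by_cases h1 : 0 ≤ (r : Int) - plane_y - (s + 1) ∧ (r : Int) - plane_y - (s + 1) < rest.length
    · have hk : ((r : Int) - plane_y - s).toNat = ((r : Int) - plane_y - (s + 1)).toNat + 1 := by omega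
      rw [if_pos h1, if_pos (by simp only [List.length_cons]; push_cast; omega)]
      have hne : ¬ (plane_y + s = (r : Int)) := by omega
      rw [hk, List.getD_cons_succ]
      simp [hne]
    · by_cases h2 : plane_y + s = (r : Int)
      · have hk : ((r : Int) - plane_y - s).toNat = 0 := by omega
        rw [if_neg h1, if_pos (by simp only [List.length_cons]; push_cast at h1 ⊢; omega)]
        simp [h2, hk]
      · rw [if_neg h1, if_neg (by simp only [List.length_cons]; push_cast at h1 ⊢; omega)]
        simp [h2]


theorem plane_lookup (width height : Int) (plane : List String) (plane_x plane_y : Int) {r c : Nat}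
    (hr : (r : Int) < height) (hc : (c : Int) < width) :
    (opsPlane width height plane plane_x plane_y).reverse.findSome? (selC r c)
      = (if 0 ≤ (r : Int) - plane_y ∧ (r : Int) - plane_y < (plane.length : Int) then
          (let line := (plane.getD ((r : Int) - plane_y).toNat "").toList
           if 0 ≤ (c : Int) - plane_x ∧ (c : Int) - plane_x < (line.length : Int) then
             some (line.getD ((c : Int) - plane_x).toNat ' ') else none)
         else none) := by
  unfold opsPlane
  rw [List.reverse_flatMap, findSome?_flatMap']
  have hfun : (fun il => ((List.reverse ∘ fun il : Int × String =>
      if 0 ≤ plane_y + il.1 ∧ plane_y + il.1 < height then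
        (PySem.List.enumerate il.2.toList 0).filterMap (fun jc =>
          if 0 ≤ plane_x + jc.1 ∧ plane_x + jc.1 < width then some (plane_y + il.1, plane_x + jc.1, jc.2) else none)
      else []) il).findSome? (selC r c))
      = (fun il : Int × String => if plane_y + il.1 = (r : Int) then
          (if plane_x ≤ (c : Int) ∧ (c : Int) < plane_x + (il.2.toList.length : Int) then
            some (il.2.toList.getD ((c : Int) - plane_x).toNat ' ') else none) else none) := by
    funext il
    by_cases hg : 0 ≤ plane_y + il.1 ∧ plane_y + il.1 < height
    · simp only [Function.comp, if_pos hg]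
      rw [block_lookup width il.2.toList 0 plane_x (plane_y + il.1) hc r]
      simp only [add_zero]
      by_cases hy : plane_y + il.1 = (r : Int)
      · by_cases hcol : plane_x ≤ (c : Int) ∧ (c : Int) < plane_x + (il.2.toList.length : Int)
        · simp [hy, hcol]
        · simp [hy, hcol]
      · simp [hy]
    · simp only [Function.comp, if_neg hg]
      rw [if_neg (by intro hy; omega)]
      simp
  rw [hfun, enum_rows_lookup plane plane_y r (fun line =>
    if plane_x ≤ (c : Int) ∧ (c : Int) < plane_x + (line.toList.length : Int) then
      some (line.toList.getD ((c : Int) - plane_x).toNat ' ') else none) 0]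
  simp only [sub_zero]
  by_cases hrow : 0 ≤ (r : Int) - plane_y ∧ (r : Int) - plane_y < (plane.length : Int)
  · rw [if_pos (by push_cast at hrow ⊢; omega), if_pos hrow]
    have hline : ((plane.getD ((r : Int) - plane_y).toNat "").toList.length : Int)
        = ((plane.getD ((r : Int) - plane_y).toNat "").toList.length : Int) := rfl
    by_cases hcol : plane_x ≤ (c : Int) ∧ (c : Int) < plane_x + ((plane.getD ((r : Int) - plane_y).toNat "").toList.length : Int)
    · rw [if_pos hcol, if_pos (by push_cast at hcol ⊢; omega)]
    · rw [if_neg hcol, if_neg (by push_cast at hcol ⊢; omega)]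
  · rw [if_neg (by push_cast at hrow ⊢; omega), if_neg hrow]


theorem getCell_grid0 (width height : Int) {r c : Nat} (hr : r < height.toNat) (hc : c < width.toNat) :
    getCell ((PySem.List.pyRange 0 height 1).map (fun _ => (PySem.List.pyRange 0 width 1).map (fun _ => ' '))) r c = ' ' := by
  unfold getCell
  have h1 : r < ((PySem.List.pyRange 0 height 1).map (fun _ => (PySem.List.pyRange 0 width 1).map (fun _ => ' '))).length := by
    simpa [PySem.List.length_pyRange_one] using hr
  have h2 : c < ((PySem.List.pyRange 0 width 1).map (fun _ => ' ')).length := by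
    simpa [PySem.List.length_pyRange_one] using hc
  rw [List.getD_eq_getElem?_getD (l := (PySem.List.pyRange 0 height 1).map (fun _ => (PySem.List.pyRange 0 width 1).map (fun _ => ' '))) (i := r),
      List.getElem?_eq_getElem h1, Option.getD_some, List.getElem_map,
      List.getD_eq_getElem?_getD, List.getElem?_eq_getElem h2, Option.getD_some, List.getElem_map]
theorem shape_grid0 (width height : Int) :
    Shape ((PySem.List.pyRange 0 height 1).map (fun _ => (PySem.List.pyRange 0 width 1).map (fun _ => ' ')))
      height.toNat width.toNat := by
  constructor
  · simp [PySem.List.length_pyRange_one]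
  · intro k hk
    simp only [List.getElem_map]
    simp [PySem.List.length_pyRange_one]


theorem ops_in_range (width height : Int) (plane : List String) (plane_x plane_y : Int)
    (clouds : List (Int × Int × String)) (hp : 0 < width → 0 < height) :
    ∀ op ∈ opsRunway width height ++ opsClouds width height clouds ++ opsPlane width height plane plane_x plane_y,
      InRangeOp width height op := by
  intro op hop
  rw [List.append_assoc, List.mem_append, List.mem_append] at hop
  rcases hop with hR | hC | hPl
  · rcases List.mem_map.mp hR with ⟨x, hx, rfl⟩
    rw [PySem.List.mem_pyRange_one] at hx
    have : 0 < height := hp (by omega)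
    exact ⟨by omega, by omega, by simpa using hx.1, by simpa using hx.2⟩
  · rcases List.mem_flatMap.mp hC with ⟨cl, _, hmem⟩
    by_cases hg : 0 ≤ cl.2.1 ∧ cl.2.1 < height
    · rw [if_pos hg] at hmem
      rcases List.mem_filterMap.mp hmem with ⟨ic, _, hsome⟩
      by_cases hcond : 0 ≤ cl.1 + ic.1 ∧ cl.1 + ic.1 < width
      · rw [if_pos hcond] at hsome
        cases hsome
        exact ⟨hg.1, hg.2, hcond.1, hcond.2⟩
      · rw [if_neg hcond] at hsome; cases hsome
    · rw [if_neg hg] at hmem; cases hmem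
  · rcases List.mem_flatMap.mp hPl with ⟨il, _, hmem⟩
    by_cases hg : 0 ≤ plane_y + il.1 ∧ plane_y + il.1 < height
    · rw [if_pos hg] at hmem
      rcases List.mem_filterMap.mp hmem with ⟨jc, _, hsome⟩
      by_cases hcond : 0 ≤ plane_x + jc.1 ∧ plane_x + jc.1 < width
      · rw [if_pos hcond] at hsome
        cases hsome
        exact ⟨hg.1, hg.2, hcond.1, hcond.2⟩
      · rw [if_neg hcond] at hsome; cases hsome
    · rw [if_neg hg] at hmem; cases hmem


-- the main pointwise correspondence
theorem getCell_eq_getElem {g : List (List Char)} {r c : Nat} (h1 : r < g.length) (h2 : c < g[r].length) :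
    getCell g r c = g[r][c] := by
  unfold getCell
  rw [List.getD_eq_getElem?_getD (l := g), List.getElem?_eq_getElem h1, Option.getD_some,
      List.getD_eq_getElem?_getD, List.getElem?_eq_getElem h2, Option.getD_some]

-- the main pointwise correspondence
theorem cell_correspond (width height : Int) (plane : List String) (plane_x plane_y : Int)
    (clouds : List (Int × Int × String)) (hp : 0 < width → 0 < height)
    {r c : Nat} (hr : r < height.toNat) (hc : c < width.toNat) :
    getCell (paintOps ((PySem.List.pyRange 0 height 1).map (fun _ => (PySem.List.pyRange 0 width 1).map (fun _ => ' ')))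
        (opsRunway width height ++ opsClouds width height clouds ++ opsPlane width height plane plane_x plane_y)) r c
      = cellB height plane plane_x plane_y clouds (r : Int) (c : Int) := by
  have hW : ((width.toNat : Int)) = width := by omega
  have hH : ((height.toNat : Int)) = height := by omega
  have hrI : (r : Int) < height := by omega
  have hcI : (c : Int) < width := by omega
  have hops : ∀ op ∈ opsRunway width height ++ opsClouds width height clouds ++ opsPlane width height plane plane_x plane_y,
      InRangeOp ((width.toNat : Int)) ((height.toNat : Int)) op := by
    rw [hW, hH]; exact ops_in_range width height plane plane_x plane_y clouds hp
  rw [getCell_paintOps hops (shape_grid0 width height) hr hc, getCell_grid0 width height hr hc]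
  rw [List.reverse_append, List.reverse_append, List.findSome?_append, List.findSome?_append]
  rw [plane_lookup width height plane plane_x plane_y hrI hcI,
      cloud_lookup width height clouds hrI hcI,
      runway_lookup width height hrI hcI]
  simp only [cellB]
  generalize (if 0 ≤ (r : Int) - plane_y ∧ (r : Int) - plane_y < (plane.length : Int) then
      (let line := (plane.getD ((r : Int) - plane_y).toNat "").toList
       if 0 ≤ (c : Int) - plane_x ∧ (c : Int) - plane_x < (line.length : Int) then
         some (line.getD ((c : Int) - plane_x).toNat ' ') else none)
      else none) = A
  generalize (clouds.reverse.findSome? (fun cl =>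
      if cl.2.1 = (r : Int) ∧ cl.1 ≤ (c : Int) ∧ (c : Int) < cl.1 + (cl.2.2.toList.length : Int) then
        some (cl.2.2.toList.getD ((c : Int) - cl.1).toNat ' ')
      else none)) = B
  rcases A with _ | ch
  · rcases B with _ | ch2
    · by_cases hR : (r : Int) = height - 1 <;> simp [hR]
    · simp
  · simp

theorem paintOps_append (g : List (List Char)) (a b : List (Int × Int × Char)) :
    paintOps g (a ++ b) = paintOps (paintOps g a) b := by
  simp [paintOps, List.foldl_append]

theorem generate_frame_spec : Claim_equal_generate_frame := by
  intro width height plane plane_x plane_y clouds hD hP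
  unfold Spec_generate_frame
  simp only [generate_frame, generate_frame_alt]
  rw [runway_fold_eq, cloud_fold_eq, plane_fold_eq, ← paintOps_append, ← paintOps_append]
  have hG : paintOps ((PySem.List.pyRange 0 height 1).map (fun _ => (PySem.List.pyRange 0 width 1).map (fun _ => ' ')))
      (opsRunway width height ++ opsClouds width height clouds ++ opsPlane width height plane plane_x plane_y)
      = (PySem.List.pyRange 0 height 1).map (fun rI => (PySem.List.pyRange 0 width 1).map (fun cI =>
          cellB height plane plane_x plane_y clouds rI cI)) := by
    have hshape := shape_paintOps
      (opsRunway width height ++ opsClouds width height clouds ++ opsPlane width height plane plane_x plane_y)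
      (shape_grid0 width height)
    apply List.ext_getElem
    · rw [hshape.1]
      simp [PySem.List.length_pyRange_one]
    · intro k h1 h2
      have hk : k < height.toNat := by rw [hshape.1] at h1; exact h1
      rw [List.getElem_map, PySem.List.getElem_pyRange_one]
      apply List.ext_getElem
      · rw [hshape.2 k h1]
        simp [PySem.List.length_pyRange_one]
      · intro j hj1 hj2
        have hj : j < width.toNat := by rw [hshape.2 k h1] at hj1; exact hj1
        rw [List.getElem_map, PySem.List.getElem_pyRange_one]
        rw [← getCell_eq_getElem h1 hj1]
        rw [cell_correspond width height plane plane_x plane_y clouds hP hk hj]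
        norm_num
  rw [← List.append_assoc, hG, List.map_map]
  rfl
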